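-- pv_equiv track=rewrite | github.com/shu120/Competitive_Programing | ABC/445/e.py | solve
-- ===== SOURCE A (Python) =====
-- import math
--
-- MOD = 998244353
--
-- def lcm(a, b):
-- 	return a // math.gcd(a, b) * b
--
-- def solve(A):
-- 	N = len(A)
-- 	out = []
-- 	for k in range(N):
-- 		L = 1
-- 		for i in range(N):
-- 			if i == k:
-- 				continue
-- 			L = lcm(L, A[i])
-- 		out.append(L % MOD)
-- 	return out
-- ===== SOURCE B (Python) =====
-- import math
--
-- MOD = 998244353
--
-- def lcm(a, b):
--     g = math.gcd(a, b)
--     return a // g * b if g else 0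
--
-- def solve(A):
--     pre = [1]
--     cur = 1
--     for a in A:
--         cur = lcm(cur, a)
--         pre.append(cur)
--     suf = [1]
--     cur = 1
--     for a in reversed(A):
--         cur = lcm(a, cur)
--         suf.append(cur)
--     suf.reverse()
--     return [lcm(pre[k], suf[k + 1]) % MOD for k in range(len(A))]
-- ===== Notes on version B (the rewrite author's own statement) =====
-- stated objective: faster
-- what changed: B replaces A's per-index rescan of the whole list (N LCM folds of length N-1) by one prefix-LCM scan and one suffix-LCM scan, combining pre[k] with suf[k+1] for each index.
import Mathlib
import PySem

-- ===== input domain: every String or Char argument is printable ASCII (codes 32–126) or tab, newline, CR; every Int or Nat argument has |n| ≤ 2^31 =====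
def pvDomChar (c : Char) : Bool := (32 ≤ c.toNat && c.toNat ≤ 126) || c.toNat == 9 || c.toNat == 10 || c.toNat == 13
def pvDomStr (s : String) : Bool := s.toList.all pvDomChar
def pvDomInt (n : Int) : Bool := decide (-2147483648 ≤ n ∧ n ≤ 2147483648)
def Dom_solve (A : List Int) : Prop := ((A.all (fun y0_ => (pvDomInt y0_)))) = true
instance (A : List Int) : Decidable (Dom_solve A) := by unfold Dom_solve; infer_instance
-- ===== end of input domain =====

-- B replaces A's O(N^2) per-index LCM rescans by prefix/suffix LCM scan arrays combined per index (objective: faster, asymptotic).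

-- ===== PORT A =====
def MOD : Int := 998244353

-- A's helper `lcm(a, b) = a // math.gcd(a, b) * b` (math.gcd = gcd of absolute values, nonnegative)
def pyLcm (a b : Int) : Int := PySem.Int.floordiv a ((Int.gcd a b : Int)) * b

def solve (A : List Int) : List Int :=
  let N : Int := PySem.List.len A
  (PySem.List.pyRange 0 N 1).foldl
    (fun out k =>
      out ++ [PySem.Int.mod
        ((PySem.List.pyRange 0 N 1).foldl
          (fun L i => if i = k then L else pyLcm L (PySem.List.pyGetD A i 0)) 1)
        MOD])
    []

-- ===== PORT B =====
-- B's total helper `lcm(a, b) = a // g * b if g else 0` where g = math.gcd(a, b)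
def pyLcmB (a b : Int) : Int :=
  let g : Int := (Int.gcd a b : Int)
  if g ≠ 0 then PySem.Int.floordiv a g * b else 0

def solve_alt (A : List Int) : List Int :=
  let pre := (A.foldl (fun (s : List Int × Int) a => (s.1 ++ [pyLcmB s.2 a], pyLcmB s.2 a)) ([1], 1)).1
  let suf := ((A.reverse.foldl (fun (s : List Int × Int) a => (s.1 ++ [pyLcmB a s.2], pyLcmB a s.2)) ([1], 1)).1).reverse
  (PySem.List.pyRange 0 (PySem.List.len A) 1).map
    (fun k => PySem.Int.mod (pyLcmB (PySem.List.pyGetD pre k 0) (PySem.List.pyGetD suf (k + 1) 0)) MOD)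

-- ===== PRECONDITION & SPEC =====
-- Pre_ excludes exactly the inputs where A raises ZeroDivisionError: lists with at least
-- two zeros and length ≥ 3 (some index k then leaves two zeros in the rest, and
-- math.gcd(0, 0) = 0 makes A's `a // g` divide by zero).
def Pre_solve (A : List Int) : Prop := ¬ (2 ≤ A.count 0 ∧ 3 ≤ A.length)
instance (A : List Int) : Decidable (Pre_solve A) := by unfold Pre_solve; infer_instance
def pvWitness_solve : List Int := [2, 3, 4]

def Spec_solve (A : List Int) (out : List Int) : Prop := out = solve_alt A
instance (A : List Int) (out : List Int) : Decidable (Spec_solve A out) := by unfold Spec_solve; infer_instance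

-- ===== CLAIM (what is proved, stated in full; the proofs are below) =====
def Claim_equal_solve : Prop := ∀ (A : List Int), Dom_solve A → Pre_solve A → Spec_solve A (solve A)

-- ===== LEMMAS AND PROOFS =====

theorem pyLcm_norm (a b : Int) : pyLcm a b = a.sign * b.sign * (Nat.lcm a.natAbs b.natAbs : Int) := by
  rcases eq_or_ne a 0 with rfl | ha
  · rcases eq_or_ne b 0 with rfl | hb
    · decide
    · rw [pyLcm, PySem.Int.floordiv_eq_ediv_of_pos (by simp [Int.gcd]; omega)]
      simp
  · rcases eq_or_ne b 0 with rfl | hb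
    · rw [pyLcm, PySem.Int.floordiv_eq_ediv_of_pos (by simp [Int.gcd]; omega)]
      simp
    · have hg : 0 < (Int.gcd a b : Int) := by
        exact_mod_cast Int.gcd_pos_of_ne_zero_left b ha
      rw [pyLcm, PySem.Int.floordiv_eq_ediv_of_pos hg]
      have hdvd : Nat.gcd a.natAbs b.natAbs ∣ a.natAbs := Nat.gcd_dvd_left _ _
      have hnat : a.natAbs / Nat.gcd a.natAbs b.natAbs * b.natAbs = Nat.lcm a.natAbs b.natAbs := by
        rw [Nat.lcm, Nat.mul_comm a.natAbs b.natAbs, Nat.mul_div_assoc _ hdvd, Nat.mul_comm]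
      have hgd : Int.gcd a b = Nat.gcd a.natAbs b.natAbs := rfl
      have key : ((a.natAbs : Int) / ((Int.gcd a b : Nat) : Int) * (b.natAbs : Int)) = (Nat.lcm a.natAbs b.natAbs : Int) := by
        rw [hgd, ← Int.natCast_div]
        exact_mod_cast congrArg (Nat.cast : Nat → Int) hnat
      have ha2 : a = a.sign * (a.natAbs : Int) := (Int.sign_mul_natAbs a).symm
      have hb2 : b = b.sign * (b.natAbs : Int) := (Int.sign_mul_natAbs b).symm
      calc a / (Int.gcd a b : Int) * b
          = (a.sign * (a.natAbs : Int)) / (Int.gcd a b : Int) * (b.sign * (b.natAbs : Int)) := by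
            rw [← ha2, ← hb2]
        _ = a.sign * ((a.natAbs : Int) / (Int.gcd a b : Int)) * (b.sign * (b.natAbs : Int)) := by
            rw [Int.mul_ediv_assoc _ (by rw [hgd]; exact Int.natCast_dvd_natCast.mpr hdvd : ((Int.gcd a b : Nat) : Int) ∣ (a.natAbs : Int))]
        _ = a.sign * b.sign * ((a.natAbs : Int) / (Int.gcd a b : Int) * (b.natAbs : Int)) := by ring
        _ = a.sign * b.sign * (Nat.lcm a.natAbs b.natAbs : Int) := by rw [key]

theorem pyLcmB_eq (a b : Int) : pyLcmB a b = pyLcm a b := by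
  by_cases h : ((Int.gcd a b : Nat) : Int) = 0
  · have h0 : Int.gcd a b = 0 := by exact_mod_cast h
    obtain ⟨ha, hb⟩ := Int.gcd_eq_zero_iff.mp h0
    subst ha; subst hb; decide
  · show (if ((Int.gcd a b : Nat) : Int) ≠ 0 then PySem.Int.floordiv a ((Int.gcd a b : Nat) : Int) * b else 0) = PySem.Int.floordiv a ((Int.gcd a b : Nat) : Int) * b
    rw [if_pos h]

theorem pyLcm_one_left (a : Int) : pyLcm 1 a = a := by
  rw [pyLcm_norm]; simp [Int.sign_mul_abs]

theorem pyLcm_one_right (a : Int) : pyLcm a 1 = a := by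
  rw [pyLcm_norm]; simp [Int.sign_mul_abs]

theorem natAbs_pyLcm (a b : Int) : (pyLcm a b).natAbs = Nat.lcm a.natAbs b.natAbs := by
  rw [pyLcm_norm]
  rcases eq_or_ne a 0 with rfl | ha
  · simp
  rcases eq_or_ne b 0 with rfl | hb
  · simp
  simp [Int.natAbs_mul, Int.natAbs_sign, ha, hb]

theorem sign_pyLcm (a b : Int) : (pyLcm a b).sign = a.sign * b.sign := by
  rw [pyLcm_norm]
  rcases eq_or_ne a 0 with rfl | ha
  · simp
  rcases eq_or_ne b 0 with rfl | hb
  · simp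
  have hL : (0 : Int) < (Nat.lcm a.natAbs b.natAbs : Int) := by
    exact_mod_cast Nat.pos_of_ne_zero (Nat.lcm_ne_zero (Int.natAbs_ne_zero.mpr ha) (Int.natAbs_ne_zero.mpr hb))
  rw [Int.sign_mul, Int.sign_mul, Int.sign_sign, Int.sign_sign, Int.sign_eq_one_of_pos hL, mul_one]

theorem pyLcm_assoc (a b c : Int) : pyLcm (pyLcm a b) c = pyLcm a (pyLcm b c) := by
  rw [pyLcm_norm (pyLcm a b) c, pyLcm_norm a (pyLcm b c), sign_pyLcm, natAbs_pyLcm, sign_pyLcm, natAbs_pyLcm, Nat.lcm_assoc]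
  ring

theorem foldl_pyLcm (xs : List Int) : ∀ c : Int, xs.foldl pyLcm c = pyLcm c (xs.foldr pyLcm 1) := by
  induction xs with
  | nil => intro c; simp [pyLcm_one_right]
  | cons x xs ih => intro c; simp only [List.foldl_cons, List.foldr_cons, ih, pyLcm_assoc]

theorem scanl_head_tail (f : Int → Int → Int) (b : Int) (l : List Int) :
    List.scanl f b l = b :: (List.scanl f b l).tail := by
  cases l <;> simp [List.scanl]

theorem foldl_scan (f : Int → Int → Int) :
    ∀ (xs : List Int) (p : List Int) (c : Int),
    xs.foldl (fun (s : List Int × Int) a => (s.1 ++ [f s.2 a], f s.2 a)) (p, c)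
      = (p ++ (List.scanl f c xs).tail, xs.foldl f c) := by
  intro xs
  induction xs with
  | nil => intro p c; simp [List.scanl]
  | cons x xs ih =>
    intro p c
    simp only [List.foldl_cons, ih, List.scanl_cons, List.tail_cons]
    rw [scanl_head_tail f (f c x) xs]
    simp

theorem scanl_getD (f : Int → Int → Int) :
    ∀ (xs : List Int) (c : Int) (k : Nat), k ≤ xs.length →
    (List.scanl f c xs).getD k 0 = (xs.take k).foldl f c := by
  intro xs
  induction xs with
  | nil =>
    intro c k hk
    have : k = 0 := by simpa using hk
    subst this; simp [List.scanl]
  | cons x xs ih =>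
    intro c k hk
    cases k with
    | zero => simp [List.scanl]
    | succ k =>
      simp only [List.scanl_cons, List.getD, List.take_succ_cons, List.foldl_cons]
      exact ih (f c x) k (by simpa using hk)

theorem foldl_range_getD (f : Int → Int → Int) (xs : List Int) :
    ∀ (n : Nat) (a b init : Int), 0 ≤ a → b ≤ xs.length → (b - a).toNat = n →
    (PySem.List.pyRange a b 1).foldl (fun L i => f L (PySem.List.pyGetD xs i 0)) init
      = ((xs.take b.toNat).drop a.toNat).foldl f init := by
  intro n
  induction n with
  | zero =>
    intro a b init h0 hb hn
    rw [PySem.List.pyRange_one_eq_nil (by omega)]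
    rw [List.drop_of_length_le (by rw [List.length_take]; omega)]
    simp
  | succ n ih =>
    intro a b init h0 hb hn
    have hab : a < b := by omega
    rw [PySem.List.pyRange_one_cons hab, List.foldl_cons]
    rw [ih (a + 1) b _ (by omega) hb (by omega)]
    have hstep : (a + 1).toNat = a.toNat + 1 := by omega
    rw [hstep]
    have htlen : a.toNat < (xs.take b.toNat).length := by rw [List.length_take]; omega
    rw [PySem.List.pyGetD_eq_getElem xs 0 h0 (by omega)]
    rw [List.drop_eq_getElem_cons htlen, List.foldl_cons, List.getElem_take]

theorem inner_eval (A : List Int) (k : Nat) (hk : k < A.length) :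
    (PySem.List.pyRange 0 (A.length : Int) 1).foldl
        (fun L i => if i = (k : Int) then L else pyLcm L (PySem.List.pyGetD A i 0)) 1
      = pyLcm ((A.take k).foldr pyLcm 1) ((A.drop (k + 1)).foldr pyLcm 1) := by
  rw [PySem.List.pyRange_one_append 0 (k : Int) (A.length : Int) (by omega) (by exact_mod_cast hk.le)]
  rw [PySem.List.pyRange_one_cons (show (k : Int) < (A.length : Int) by exact_mod_cast hk)]
  rw [List.foldl_append, List.foldl_cons, if_pos rfl]
  rw [PySem.List.foldl_congr_mem _ _ (fun L i => pyLcm L (PySem.List.pyGetD A i 0)) 1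
      (by intro acc x hx
          have := (PySem.List.mem_pyRange_one).mp hx
          rw [if_neg (by omega)])]
  rw [PySem.List.foldl_congr_mem _ _ (fun L i => pyLcm L (PySem.List.pyGetD A i 0)) _
      (by intro acc x hx
          have := (PySem.List.mem_pyRange_one).mp hx
          rw [if_neg (by omega)])]
  rw [foldl_range_getD pyLcm A ((k : Int) - 0).toNat 0 (k : Int) 1 (by omega) (by exact_mod_cast hk.le) rfl]
  rw [foldl_range_getD pyLcm A ((A.length : Int) - ((k : Int) + 1)).toNat ((k : Int) + 1) (A.length : Int) _ (by omega) (by omega) rfl]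
  have h1 : ((A.take (k : Int).toNat).drop (0 : Int).toNat) = A.take k := by simp
  have h2 : ((A.take (A.length : Int).toNat).drop ((k : Int) + 1).toNat) = A.drop (k + 1) := by
    have h3 : ((A.length : Int)).toNat = A.length := by omega
    have h4 : ((k : Int) + 1).toNat = k + 1 := by omega
    rw [h3, h4, List.take_length]
  rw [h1, h2, foldl_pyLcm, foldl_pyLcm, pyLcm_one_left]

theorem solve_eq (A : List Int) :
    solve A = (List.range A.length).map
      (fun n => PySem.Int.mod (pyLcm ((A.take n).foldr pyLcm 1) ((A.drop (n + 1)).foldr pyLcm 1)) MOD) := by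
  show (PySem.List.pyRange 0 (PySem.List.len A) 1).foldl _ [] = _
  rw [PySem.List.foldl_append_singleton_eq_map
      (fun k => PySem.Int.mod
        ((PySem.List.pyRange 0 (PySem.List.len A) 1).foldl
          (fun L i => if i = k then L else pyLcm L (PySem.List.pyGetD A i 0)) 1) MOD)]
  rw [List.nil_append, PySem.List.len_eq, PySem.List.pyRange_zero_nat, List.map_map]
  apply List.map_congr_left
  intro n hn
  have hn' : n < A.length := List.mem_range.mp hn
  simp only [Function.comp]
  rw [← PySem.List.pyRange_zero_nat, inner_eval A n hn']

theorem pre_fst (A : List Int) :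
    (A.foldl (fun (s : List Int × Int) a => (s.1 ++ [pyLcmB s.2 a], pyLcmB s.2 a)) ([1], 1)).1
      = List.scanl pyLcmB 1 A := by
  rw [foldl_scan]
  show [1] ++ (List.scanl pyLcmB 1 A).tail = List.scanl pyLcmB 1 A
  rw [List.singleton_append]
  exact (scanl_head_tail pyLcmB 1 A).symm

theorem suf_fst (A : List Int) :
    (A.reverse.foldl (fun (s : List Int × Int) a => (s.1 ++ [pyLcmB a s.2], pyLcmB a s.2)) ([1], 1)).1
      = List.scanl (fun c a => pyLcmB a c) 1 A.reverse := by
  rw [foldl_scan (fun c a => pyLcmB a c) A.reverse [1] 1]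
  show [1] ++ (List.scanl (fun c a => pyLcmB a c) 1 A.reverse).tail = _
  rw [List.singleton_append]
  exact (scanl_head_tail _ 1 A.reverse).symm

theorem solve_alt_eq (A : List Int) :
    solve_alt A = (List.range A.length).map
      (fun n => PySem.Int.mod (pyLcm ((A.take n).foldr pyLcm 1) ((A.drop (n + 1)).foldr pyLcm 1)) MOD) := by
  show (PySem.List.pyRange 0 (PySem.List.len A) 1).map _ = _
  rw [pre_fst, suf_fst, PySem.List.len_eq, PySem.List.pyRange_zero_nat, List.map_map]
  apply List.map_congr_left
  intro n hn
  have hn' : n < A.length := List.mem_range.mp hn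
  simp only [Function.comp]
  have hlen : (List.scanl (fun c a => pyLcmB a c) 1 A.reverse).length = A.length + 1 := by
    simp
  have hpre : PySem.List.pyGetD (List.scanl pyLcmB 1 A) (n : Int) 0 = (A.take n).foldl pyLcmB 1 := by
    rw [PySem.List.pyGetD_natCast]
    exact scanl_getD pyLcmB A 1 n hn'.le
  have hsuf : PySem.List.pyGetD (List.scanl (fun c a => pyLcmB a c) 1 A.reverse).reverse ((n : Int) + 1) 0
      = (A.drop (n + 1)).foldr pyLcmB 1 := by
    have hc : ((n : Int) + 1) = ((n + 1 : Nat) : Int) := by push_cast; ring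
    rw [hc, PySem.List.pyGetD_natCast, List.getD_eq_getElem?_getD,
        List.getElem?_reverse (by rw [hlen]; omega), hlen]
    have hidx : A.length + 1 - 1 - (n + 1) = A.length - (n + 1) := by omega
    rw [hidx, ← List.getD_eq_getElem?_getD,
        scanl_getD (fun c a => pyLcmB a c) A.reverse 1 (A.length - (n + 1)) (by rw [List.length_reverse]; omega)]
    rw [List.take_reverse, List.foldl_reverse]
    have hd : A.length - (A.length - (n + 1)) = n + 1 := by omega
    rw [hd]
  rw [hpre, hsuf]
  rw [show pyLcmB = pyLcm from funext fun a => funext fun b => pyLcmB_eq a b]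
  rw [foldl_pyLcm, pyLcm_one_left]

-- ===== VERDICT (by name: the statement is the Claim_ definition above) =====
theorem solve_spec : Claim_equal_solve := by
  intro A _ _
  show solve A = solve_alt A
  rw [solve_eq, solve_alt_eq]
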